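-- pv_equiv track=rewrite | github.com/alorenzetti64/SIR-statistiche | app_multi.py | parse_dvw_minimal
-- ===== SOURCE A (Python) =====
-- def parse_dvw_minimal(dvw_text: str) -> dict:
--     season = None
--     competition = None
--     teams: list[str] = []
--
--     lines = dvw_text.splitlines()
--     i = 0
--     while i < len(lines):
--         line = lines[i].strip()
--
--         if line == "[3MATCH]":
--             if i + 1 < len(lines):
--                 parts = lines[i + 1].split(";")
--                 if len(parts) >= 4:
--                     season = parts[2].strip() or None
--                     competition = parts[3].strip() or None
--             i += 1
--
--         if line == "[3TEAMS]":
--             j = i + 1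
--             while j < len(lines):
--                 row = lines[j].strip()
--                 if not row or row.startswith("["):
--                     break
--                 parts = row.split(";")
--                 if len(parts) >= 2:
--                     teams.append(parts[1].strip())
--                 j += 1
--             i = j
--             continue
--
--         i += 1
--
--     team_a = teams[0] if len(teams) >= 1 else ""
--     team_b = teams[1] if len(teams) >= 2 else ""
--
--     return {"season": season, "competition": competition, "team_a": team_a, "team_b": team_b}
-- ===== SOURCE B (Python) =====
-- def parse_dvw_minimal(dvw_text: str) -> dict:
--     lines = dvw_text.splitlines()
--
--     # Phase 1: one linear pass with a 3-state scanner, collecting raw section rows.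
--     match_rows = []   # the raw line following each effective [3MATCH] header
--     team_rows = []    # the stripped rows of every [3TEAMS] section, in order
--     mode = 0          # 0 = scanning, 1 = next line is match data, 2 = inside a teams section
--     for raw in lines:
--         if mode == 1:
--             match_rows.append(raw)
--             mode = 0
--             continue
--         s = raw.strip()
--         if mode == 2:
--             if s and not s.startswith("["):
--                 team_rows.append(s)
--                 continue
--             mode = 0
--         if s == "[3MATCH]":
--             mode = 1
--         elif s == "[3TEAMS]":
--             mode = 2
--
--     # Phase 2: extract the fields from the collected rows.
--     season = None
--     competition = None
--     for raw in match_rows: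
--         parts = raw.split(";")
--         if len(parts) >= 4:
--             season = parts[2].strip() or None
--             competition = parts[3].strip() or None
--
--     teams = [p[1].strip() for p in (r.split(";") for r in team_rows) if len(p) >= 2]
--     team_a = teams[0] if len(teams) >= 1 else ""
--     team_b = teams[1] if len(teams) >= 2 else ""
--
--     return {"season": season, "competition": competition, "team_a": team_a, "team_b": team_b}
-- ===== Notes on version B (the rewrite author's own statement) =====
-- stated objective: alternative
-- what changed: A walks the lines with an index-jumping outer while-loop containing a nested inner while for the [3TEAMS] section; B makes one flat linear pass with a 3-state scanner (scan / capture-match-line / in-teams-section) that only collects the raw section rows, and a separate second phase that extracts season/competition/teams from the collected rows.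
import Mathlib
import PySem

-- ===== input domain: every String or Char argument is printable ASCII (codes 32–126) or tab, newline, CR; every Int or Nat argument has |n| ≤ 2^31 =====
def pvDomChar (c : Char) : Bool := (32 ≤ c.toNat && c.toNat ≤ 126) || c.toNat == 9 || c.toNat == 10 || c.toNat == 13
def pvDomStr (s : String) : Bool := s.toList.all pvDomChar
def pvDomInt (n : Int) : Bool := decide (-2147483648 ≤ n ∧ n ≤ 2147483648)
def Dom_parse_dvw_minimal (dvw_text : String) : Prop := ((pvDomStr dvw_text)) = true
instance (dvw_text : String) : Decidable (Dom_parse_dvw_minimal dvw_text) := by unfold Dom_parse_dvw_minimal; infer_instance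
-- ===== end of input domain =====

-- B replaces A's index-jumping nested while-loops by a flat one-pass 3-state scanner plus a
-- separate extraction phase (objective: alternative decomposition, same O(n) cost).

-- ===== PORT A =====
-- Python's row.split(";") (sep nonempty, never raises); used by both ports
def pvSplit (s : String) : List String :=
  (PySem.Chars.splitOn s.toList ";".toList).map (fun cs => String.ofList cs)

-- inner `while j < len(lines): …` of A ("[3TEAMS]" section), accumulator `teams`
def pvA_teams (lines : List String) (j : Nat) (teams : List String) : Nat × List String :=
  if h : j < lines.length then
    let row := PySem.Str.strip lines[j]
    if row = "" ∨ PySem.Str.startswith row "[" then (j, teams)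
    else
      let parts := pvSplit row
      let teams' := if 2 ≤ parts.length
        then teams ++ [PySem.Str.strip (parts.getD 1 "")] else teams
      pvA_teams lines (j + 1) teams'
  else (j, teams)
termination_by lines.length - j

-- outer `while i < len(lines): …` of A; `fuel` only makes the index-jumping loop total
-- (fuel = lines.length always suffices since i strictly increases each iteration)
def pvA_main (lines : List String) (fuel i : Nat) (season competition : Option String)
    (teams : List String) : Option String × Option String × List String :=
  match fuel with
  | 0 => (season, competition, teams)
  | fuel + 1 =>
    if h : i < lines.length then
      let line := PySem.Str.strip lines[i]
      let st :=
        if line = "[3MATCH]" then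
          if i + 1 < lines.length then
            let parts := pvSplit (lines.getD (i + 1) "")
            if 4 ≤ parts.length then
              ((let s := PySem.Str.strip (parts.getD 2 ""); if s = "" then none else some s),
               (let c := PySem.Str.strip (parts.getD 3 ""); if c = "" then none else some c),
               i + 1)
            else (season, competition, i + 1)
          else (season, competition, i)
        else (season, competition, i)
      if line = "[3TEAMS]" then
        let r := pvA_teams lines (st.2.2 + 1) teams
        pvA_main lines fuel r.1 st.1 st.2.1 r.2
      else
        pvA_main lines fuel (st.2.2 + 1) st.1 st.2.1 teams
    else (season, competition, teams)

def parse_dvw_minimal (dvw_text : String) : List (String × Option String) :=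
  let lines := PySem.Str.splitlines dvw_text
  let r := pvA_main lines lines.length 0 none none []
  let teams := r.2.2
  let team_a := if 1 ≤ teams.length then teams.getD 0 "" else ""
  let team_b := if 2 ≤ teams.length then teams.getD 1 "" else ""
  [("season", r.1), ("competition", r.2.1), ("team_a", some team_a), ("team_b", some team_b)]

-- ===== PORT B =====
-- phase-1 scanner step: state = (mode, match_rows, team_rows);
-- mode 0 = scanning, 1 = next line is match data, 2 = inside a teams section
def pvB_step (st : Nat × List String × List String) (raw : String) :
    Nat × List String × List String :=
  if st.1 = 1 then (0, st.2.1 ++ [raw], st.2.2)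
  else
    let s := PySem.Str.strip raw
    if st.1 = 2 ∧ s ≠ "" ∧ ¬ PySem.Str.startswith s "[" then (2, st.2.1, st.2.2 ++ [s])
    else if s = "[3MATCH]" then (1, st.2.1, st.2.2)
    else if s = "[3TEAMS]" then (2, st.2.1, st.2.2)
    else (0, st.2.1, st.2.2)

-- phase-2 fold over the collected match rows
def pvB_matchStep (p : Option String × Option String) (raw : String) :
    Option String × Option String :=
  let parts := pvSplit raw
  if 4 ≤ parts.length then
    ((let s := PySem.Str.strip (parts.getD 2 ""); if s = "" then none else some s),
     (let c := PySem.Str.strip (parts.getD 3 ""); if c = "" then none else some c))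
  else p

-- phase-2 comprehension over the collected team rows
def pvB_extractTeams (rows : List String) : List String :=
  (rows.map (fun r => pvSplit r)).filterMap
    (fun p => if 2 ≤ p.length then some (PySem.Str.strip (p.getD 1 "")) else none)

def parse_dvw_minimal_alt (dvw_text : String) : List (String × Option String) :=
  let lines := PySem.Str.splitlines dvw_text
  let st := lines.foldl pvB_step (0, [], [])
  let sc := st.2.1.foldl pvB_matchStep (none, none)
  let teams := pvB_extractTeams st.2.2
  let team_a := if 1 ≤ teams.length then teams.getD 0 "" else ""
  let team_b := if 2 ≤ teams.length then teams.getD 1 "" else ""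
  [("season", sc.1), ("competition", sc.2), ("team_a", some team_a), ("team_b", some team_b)]

-- ===== PRECONDITION & SPEC =====
def Spec_parse_dvw_minimal (dvw_text : String) (out : List (String × Option String)) : Prop := out = parse_dvw_minimal_alt dvw_text
instance (dvw_text : String) (out : List (String × Option String)) : Decidable (Spec_parse_dvw_minimal dvw_text out) := by unfold Spec_parse_dvw_minimal; infer_instance

-- ===== CLAIM (what is proved, stated in full; the proofs are below) =====
def Claim_equal_parse_dvw_minimal : Prop := ∀ (dvw_text : String), Dom_parse_dvw_minimal dvw_text → Spec_parse_dvw_minimal dvw_text (parse_dvw_minimal dvw_text)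

-- ===== LEMMAS AND PROOFS =====

-- the rows B's scanner collects from a teams section starting at line j, and the break index
def pvCollect (lines : List String) (j : Nat) : Nat × List String :=
  if h : j < lines.length then
    let row := PySem.Str.strip lines[j]
    if row = "" ∨ PySem.Str.startswith row "[" then (j, [])
    else
      let r := pvCollect lines (j + 1)
      (r.1, row :: r.2)
  else (j, [])
termination_by lines.length - j

theorem pvCollect_ge (lines : List String) (j : Nat) : j ≤ (pvCollect lines j).1 := by
  fun_induction pvCollect with
  | case1 j h row hbrk => omega
  | case2 j h row r hbrk ih => exact Nat.le_of_lt ih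
  | case3 j h => omega

-- one scanner step only appends to the two accumulators
theorem pvB_step_acc (mode : Nat) (mr tr : List String) (x : String) :
    pvB_step (mode, mr, tr) x =
      ((pvB_step (mode, [], []) x).1,
       mr ++ (pvB_step (mode, [], []) x).2.1,
       tr ++ (pvB_step (mode, [], []) x).2.2) := by
  simp only [pvB_step]
  split_ifs <;> simp

-- B's scanner step only appends to its two accumulators
theorem pvB_step_shift (l : List String) (mode : Nat) (mr tr : List String) :
    l.foldl pvB_step (mode, mr, tr) =
      ((l.foldl pvB_step (mode, [], [])).1,
       mr ++ (l.foldl pvB_step (mode, [], [])).2.1,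
       tr ++ (l.foldl pvB_step (mode, [], [])).2.2) := by
  induction l generalizing mode mr tr with
  | nil => simp
  | cons x l ih =>
    rw [List.foldl_cons, List.foldl_cons, pvB_step_acc mode mr tr x, ih]
    conv_rhs => rw [show pvB_step (mode, [], []) x =
      ((pvB_step (mode, [], []) x).1, (pvB_step (mode, [], []) x).2.1,
       (pvB_step (mode, [], []) x).2.2) from rfl, ih]
    simp

-- a teams-section break line is processed the same from mode 2 and mode 0
theorem pvB_step_break (mr tr : List String) (x : String)
    (hx : PySem.Str.strip x = "" ∨ PySem.Str.startswith (PySem.Str.strip x) "[" = true) :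
    pvB_step (2, mr, tr) x = pvB_step (0, mr, tr) x := by
  rcases hx with h | h
  · simp [pvB_step, h]
  · simp at h
    simp [pvB_step, h]

-- a good teams row is collected in mode 2
theorem pvB_step_row (mr tr : List String) (x : String)
    (h1 : ¬ PySem.Str.strip x = "") (h2 : ¬ PySem.Str.startswith (PySem.Str.strip x) "[" = true) :
    pvB_step (2, mr, tr) x = (2, mr, tr ++ [PySem.Str.strip x]) := by
  simp at h2
  simp [pvB_step, h1, h2]

theorem pvB_teams (lines : List String) (j : Nat) : ∀ (mr tr : List String),
    (((lines.drop j).foldl pvB_step (2, mr, tr)).2 : List String × List String) =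
      ((lines.drop (pvCollect lines j).1).foldl pvB_step
        (0, mr, tr ++ (pvCollect lines j).2)).2 := by
  fun_induction pvCollect with
  | case1 j h row hbrk =>
    intro mr tr
    rw [List.drop_eq_getElem_cons h, List.foldl_cons, List.foldl_cons,
        pvB_step_break mr tr _ hbrk]
    simp
  | case2 j h row hneg r ih =>
    intro mr tr
    have h1 : ¬ row = "" := fun hr => hneg (Or.inl hr)
    have h2 : ¬ PySem.Str.startswith row "[" = true := fun hs => hneg (Or.inr hs)
    rw [List.drop_eq_getElem_cons h, List.foldl_cons, pvB_step_row mr tr _ h1 h2, ih, List.append_assoc]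
    rfl
  | case3 j h =>
    intro mr tr
    simp [List.drop_eq_nil_of_le (Nat.le_of_not_lt h)]

theorem pvB_extractTeams_append (a b : List String) :
    pvB_extractTeams (a ++ b) = pvB_extractTeams a ++ pvB_extractTeams b := by
  simp [pvB_extractTeams]

set_option maxHeartbeats 2000000 in
theorem pvA_teams_eq (lines : List String) (j : Nat) (te : List String) :
    pvA_teams lines j te = ((pvCollect lines j).1, te ++ pvB_extractTeams (pvCollect lines j).2) := by
  fun_induction pvA_teams with
  | case1 j te h row hbrk =>
    rw [pvCollect, dif_pos h]
    simp only [row] at hbrk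
    simp only [if_pos hbrk]
    simp [pvB_extractTeams]
  | case2 j te h row hneg parts teams' ih =>
    rw [pvCollect, dif_pos h, ih]
    simp only [row] at hneg
    simp only [if_neg hneg]
    by_cases hp : 2 ≤ (pvSplit (PySem.Str.strip lines[j])).length
    · have ht' : teams' = te ++ [PySem.Str.strip ((pvSplit (PySem.Str.strip lines[j])).getD 1 "")] :=
        dif_pos hp
      rw [ht']
      simp [pvB_extractTeams, hp]
    · have ht' : teams' = te := dif_neg hp
      rw [ht']
      simp [pvB_extractTeams, hp]
  | case3 j te h =>
    rw [pvCollect, dif_neg h]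
    simp [pvB_extractTeams]

set_option maxHeartbeats 2000000 in
theorem pvMain_eq (lines : List String) (fuel : Nat) :
    ∀ (i : Nat) (se co : Option String) (te : List String), lines.length ≤ i + fuel →
      pvA_main lines fuel i se co te =
        ((((lines.drop i).foldl pvB_step (0, [], [])).2.1.foldl pvB_matchStep (se, co)).1,
         (((lines.drop i).foldl pvB_step (0, [], [])).2.1.foldl pvB_matchStep (se, co)).2,
         te ++ pvB_extractTeams ((lines.drop i).foldl pvB_step (0, [], [])).2.2) := by
  induction fuel with
  | zero =>
    intro i se co te hle
    rw [List.drop_eq_nil_of_le (by omega)]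
    simp [pvA_main, pvB_extractTeams]
  | succ fuel ih =>
    intro i se co te hle
    by_cases hi : i < lines.length
    case neg =>
      rw [List.drop_eq_nil_of_le (Nat.le_of_not_lt hi), pvA_main, dif_neg hi]
      simp [pvB_extractTeams]
    case pos =>
      rw [pvA_main, dif_pos hi, List.drop_eq_getElem_cons hi, List.foldl_cons]
      by_cases hm : PySem.Str.strip lines[i] = "[3MATCH]"
      · simp only [hm, String.reduceEq, if_true, if_false]
        rw [show pvB_step (0, [], []) lines[i] = (1, [], []) from by simp [pvB_step, hm]]
        by_cases h1 : i + 1 < lines.length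
        · rw [List.drop_eq_getElem_cons h1, List.foldl_cons]
          rw [show pvB_step (1, ([] : List String), ([] : List String)) lines[i + 1]
                = (0, [lines[i + 1]], []) from by simp [pvB_step]]
          rw [pvB_step_shift (lines.drop (i + 1 + 1)) 0 [lines[i + 1]] []]
          simp only [if_pos h1, List.getD_eq_getElem lines "" h1]
          have IH := fun se' co' => ih (i + 1 + 1) se' co' te (by omega)
          by_cases h4 : 4 ≤ (pvSplit lines[i + 1]).length
          · simp only [if_pos h4]
            rw [IH]
            simp [pvB_matchStep, h4]
          · simp only [if_neg h4]
            rw [IH]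
            simp [pvB_matchStep, h4]
        · have h1' : lines.length ≤ i + 1 := Nat.le_of_not_lt h1
          rw [List.drop_eq_nil_of_le h1']
          simp only [if_neg h1, List.foldl_nil]
          have IH := fun se' co' => ih (i + 1) se' co' te (by omega)
          rw [IH, List.drop_eq_nil_of_le h1']
          simp [pvB_extractTeams]
      · by_cases ht : PySem.Str.strip lines[i] = "[3TEAMS]"
        · -- teams section
          simp only [ht, String.reduceEq, if_false, if_true]
          rw [show pvB_step (0, [], []) lines[i] = (2, [], []) from by simp [pvB_step, ht]]
          rw [pvA_teams_eq]
          have hC := pvCollect_ge lines (i + 1)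
          rw [ih (pvCollect lines (i + 1)).1 se co _ (by omega)]
          rw [pvB_teams lines (i + 1) [] []]
          rw [pvB_step_shift (lines.drop (pvCollect lines (i + 1)).1) 0 [] ([] ++ (pvCollect lines (i + 1)).2)]
          simp [pvB_extractTeams_append, List.append_assoc]
        · -- plain line
          simp only [if_neg hm, if_neg ht]
          rw [show pvB_step (0, [], []) lines[i] = (0, [], []) from by simp [pvB_step, hm, ht]]
          exact ih (i + 1) se co te (by omega)

-- ===== VERDICT (by name: the statement is the Claim_ definition above) =====
theorem parse_dvw_minimal_spec : Claim_equal_parse_dvw_minimal := by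
  intro dvw_text _
  unfold Spec_parse_dvw_minimal parse_dvw_minimal parse_dvw_minimal_alt
  have h := pvMain_eq (PySem.Str.splitlines dvw_text)
    (PySem.Str.splitlines dvw_text).length 0 none none [] (by omega)
  rw [List.drop_zero] at h
  simp only [h, List.nil_append]
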